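-- pv_equiv track=rewrite | github.com/linhdvu14/cp-sols | sols/CodeForces/1886_edu/C_Decreasing_String.py | solve
-- ===== SOURCE A (Python) =====
-- def solve(S, pos):
--     N = len(S)
--
--     round = 0
--     for i in range(N):
--         if pos - (N - i) <= 0: break
--         pos -= N - i
--         round = i + 1
--
--     removal = [-1] * N
--     st, cnt = [], 0
--     for i, c in enumerate(S):
--         while st and S[st[-1]] > c: removal[st.pop()] = cnt = cnt + 1
--         st.append(i)
--     while st: removal[st.pop()] = cnt = cnt + 1
--
--     for i, t in enumerate(removal):
--         if t > round: pos -= 1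
--         if not pos: return S[i]
-- ===== SOURCE B (Python) =====
-- def solve(S, pos):
--     N = len(S)
--     round = 0
--     for i in range(N):
--         if pos - (N - i) <= 0: break
--         pos -= N - i
--         round = i + 1
--     s = list(S)
--     for _ in range(round):
--         for i in range(len(s) - 1):
--             if s[i] > s[i + 1]:
--                 del s[i]
--                 break
--         else:
--             s.pop()
--     if 1 <= pos <= len(s):
--         return s[pos - 1]
-- ===== Notes on version B (the rewrite author's own statement) =====
-- stated objective: simpler
-- what changed: B replaces A's monotonic-stack removal-time array and counting scan by a direct simulation that performs the `round` greedy deletions one at a time (delete the first descent, else the last character) and then indexes the reduced string.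
-- outside the precondition, e.g. on solve('abc', 0): A returns None, B returns None; on solve('abc', 7): A returns None, B returns None
import Mathlib
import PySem

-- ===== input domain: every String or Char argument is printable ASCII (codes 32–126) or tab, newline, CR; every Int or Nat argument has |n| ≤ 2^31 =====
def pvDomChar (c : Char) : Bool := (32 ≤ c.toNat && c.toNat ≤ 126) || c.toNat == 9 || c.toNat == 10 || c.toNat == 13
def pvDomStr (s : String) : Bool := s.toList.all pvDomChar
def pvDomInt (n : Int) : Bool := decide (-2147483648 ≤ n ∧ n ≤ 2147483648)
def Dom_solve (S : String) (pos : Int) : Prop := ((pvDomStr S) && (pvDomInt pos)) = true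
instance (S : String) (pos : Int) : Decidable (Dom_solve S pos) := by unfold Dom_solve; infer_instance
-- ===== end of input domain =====

-- B replaces A's monotonic-stack removal-time bookkeeping by a direct simulation of the
-- `round` greedy deletions (objective: simpler, not faster).

-- ===== PORT A =====
-- `for i in range(N): if pos - (N - i) <= 0: break; pos -= N - i; round = i + 1`
def solveRoundA : List Int → Int → Int → Int → Int × Int
  | [], _, pos, round => (pos, round)
  | i :: rest, N, pos, round =>
    if pos - (N - i) ≤ 0 then (pos, round)
    else solveRoundA rest N (pos - (N - i)) (i + 1)

-- `while st and S[st[-1]] > c: removal[st.pop()] = cnt = cnt + 1`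
-- (the stack top, Python's right end, is kept at the HEAD of the Lean list;
--  stack entries are enumerate indices, always in range, so pyGetD's default is dead)
def popWhileA (s : List Char) (c : Char) : List Int → List Int → Int → List Int × List Int × Int
  | [], removal, cnt => ([], removal, cnt)
  | j :: st, removal, cnt =>
    if PySem.List.pyGetD s j ' ' > c then
      popWhileA s c st (PySem.List.pySetD removal j (cnt + 1)) (cnt + 1)
    else (j :: st, removal, cnt)

-- `for i, c in enumerate(S): <while loop>; st.append(i)`
def buildLoopA (s : List Char) : List (Int × Char) → List Int → List Int → Int → List Int × List Int × Int
  | [], st, removal, cnt => (st, removal, cnt)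
  | (i, c) :: rest, st, removal, cnt =>
    let r := popWhileA s c st removal cnt
    buildLoopA s rest (i :: r.1) r.2.1 r.2.2

-- `while st: removal[st.pop()] = cnt = cnt + 1`
def drainLoopA : List Int → List Int → Int → List Int
  | [], removal, _ => removal
  | j :: st, removal, cnt => drainLoopA st (PySem.List.pySetD removal j (cnt + 1)) (cnt + 1)

-- `for i, t in enumerate(removal): if t > round: pos -= 1; if not pos: return S[i]`
-- the fall-through returns Python's None; "" stands for it (excluded by Pre_solve)
def scanLoopA (s : List Char) (round : Int) : List (Int × Int) → Int → String
  | [], _ => ""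
  | (i, t) :: rest, pos =>
    let pos' := if t > round then pos - 1 else pos
    if pos' = 0 then String.ofList [PySem.List.pyGetD s i ' ']
    else scanLoopA s round rest pos'

def solve (S : String) (pos : Int) : String :=
  let s := S.toList
  let N : Int := PySem.List.len s
  let pr := solveRoundA (PySem.List.pyRange 0 N 1) N pos 0
  let b := buildLoopA s (PySem.List.enumerate s) [] (List.replicate s.length (-1 : Int)) 0
  let removal := drainLoopA b.1 b.2.1 b.2.2
  scanLoopA s pr.2 (PySem.List.enumerate removal) pr.1

-- ===== PORT B =====
-- same first loop as A's Python (B's Python keeps it verbatim)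
def solveRoundB : List Int → Int → Int → Int → Int × Int
  | [], _, pos, round => (pos, round)
  | i :: rest, N, pos, round =>
    if pos - (N - i) ≤ 0 then (pos, round)
    else solveRoundB rest N (pos - (N - i)) (i + 1)

-- one greedy deletion: `for i in range(len(s)-1): if s[i] > s[i+1]: del s[i]; break / else: s.pop()`
-- (scan for the first descent, delete it, else drop the last char; [] is unreachable under round ≤ N)
def delOnceB : List Char → List Char
  | [] => []
  | [_] => []
  | a :: b :: t => if a > b then b :: t else a :: delOnceB (b :: t)

-- `for _ in range(round): <one deletion>`
def delIterB : Nat → List Char → List Char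
  | 0, s => s
  | n + 1, s => delIterB n (delOnceB s)

def solve_alt (S : String) (pos : Int) : String :=
  let N : Int := PySem.List.len S.toList
  let pr := solveRoundB (PySem.List.pyRange 0 N 1) N pos 0
  let s := delIterB pr.2.toNat S.toList
  if 1 ≤ pr.1 ∧ pr.1 ≤ PySem.List.len s then
    String.ofList [PySem.List.pyGetD s (pr.1 - 1) ' ']
  else ""  -- Python's None fall-through (excluded by Pre_solve)

-- ===== PRECONDITION & SPEC =====
-- Pre_solve excludes exactly the inputs (pos < 1 or pos > N(N+1)/2) on which Python A falls
-- through and returns None, which is not a String value.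
def Pre_solve (S : String) (pos : Int) : Prop :=
  1 ≤ pos ∧ pos ≤ (S.toList.length : Int) * ((S.toList.length : Int) + 1) / 2
instance (S : String) (pos : Int) : Decidable (Pre_solve S pos) := by unfold Pre_solve; infer_instance
def pvWitness_solve : String × Int := ("cab", 4)

def Spec_solve (S : String) (pos : Int) (out : String) : Prop := out = solve_alt S pos
instance (S : String) (pos : Int) (out : String) : Decidable (Spec_solve S pos out) := by unfold Spec_solve; infer_instance

-- ===== CLAIM (what is proved, stated in full; the proofs are below) =====
def Claim_equal_solve : Prop := ∀ (S : String) (pos : Int), Dom_solve S pos → Pre_solve S pos → Spec_solve S pos (solve S pos)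

-- ===== LEMMAS AND PROOFS =====

-- abstract model: the stack algorithm over (index, char) pairs, emitting indices in pop order
def runPops : List (Int × Char) → List (Int × Char) → List Int
  | st, [] => st.map Prod.fst
  | [], (i, c) :: rest => runPops [(i, c)] rest
  | (j, d) :: st, (i, c) :: rest =>
    if d > c then j :: runPops st ((i, c) :: rest)
    else runPops ((i, c) :: (j, d) :: st) rest
termination_by st l => (l.length, st.length)

-- one greedy deletion / its iteration, on pairs
def delOnceP : List (Int × Char) → List (Int × Char)
  | [] => []
  | [_] => []
  | a :: b :: t => if a.2 > b.2 then b :: t else a :: delOnceP (b :: t)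

def delIterP : Nat → List (Int × Char) → List (Int × Char)
  | 0, l => l
  | n + 1, l => delIterP n (delOnceP l)

-- index deleted by one greedy deletion (first descent, else the last element)
def firstPopIdx : List (Int × Char) → Int
  | [] => 0
  | [p] => p.1
  | a :: b :: t => if a.2 > b.2 then a.1 else firstPopIdx (b :: t)

-- abstract drain: give the popped indices times cnt+1, cnt+2, …
def applyPops : List Int → Int → List Int → List Int
  | removal, _, [] => removal
  | removal, cnt, j :: P => applyPops (PySem.List.pySetD removal j (cnt + 1)) (cnt + 1) P

theorem solveRoundAB (l : List Int) (N pos round : Int) :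
    solveRoundA l N pos round = solveRoundB l N pos round := by
  induction l generalizing pos round with
  | nil => rfl
  | cons i rest ih => simp only [solveRoundA, solveRoundB]; split <;> simp [ih]

theorem solveRoundB_pos_ge (l : List Int) (N pos round : Int)
    (h : 1 ≤ pos) : 1 ≤ (solveRoundB l N pos round).1 := by
  induction l generalizing pos round with
  | nil => simpa using h
  | cons i rest ih =>
    simp only [solveRoundB]
    split
    · simpa using h
    · exact ih _ _ (by omega)

theorem solveRoundB_round_le (l : List Int) (N pos round : Int)
    (h0 : 0 ≤ round) (hN : round ≤ N) (hl : ∀ i ∈ l, 0 ≤ i ∧ i + 1 ≤ N) :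
    0 ≤ (solveRoundB l N pos round).2 ∧ (solveRoundB l N pos round).2 ≤ N := by
  induction l generalizing pos round with
  | nil => exact ⟨h0, hN⟩
  | cons i rest ih =>
    have hi := hl i (by simp)
    simp only [solveRoundB]
    split
    · exact ⟨h0, hN⟩
    · exact ih _ _ (by omega) (by omega) (fun j hj => hl j (by simp [hj]))

theorem runPops_nil (st : List (Int × Char)) : runPops st [] = st.map Prod.fst := by
  rw [runPops.eq_def]

theorem runPops_start (i : Int) (c : Char) (rest : List (Int × Char)) :
    runPops [] ((i, c) :: rest) = runPops [(i, c)] rest := by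
  rw [runPops.eq_def]

theorem runPops_pop (j : Int) (d : Char) (st : List (Int × Char)) (i : Int) (c : Char)
    (rest : List (Int × Char)) (h : d > c) :
    runPops ((j, d) :: st) ((i, c) :: rest) = j :: runPops st ((i, c) :: rest) := by
  rw [runPops.eq_def]; simp [h]

theorem runPops_nopop (j : Int) (d : Char) (st : List (Int × Char)) (i : Int) (c : Char)
    (rest : List (Int × Char)) (h : ¬ d > c) :
    runPops ((j, d) :: st) ((i, c) :: rest) = runPops ((i, c) :: (j, d) :: st) rest := by
  rw [runPops.eq_def]; simp [h]

theorem runPops_push (st l : List (Int × Char)) (a : Int × Char)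
    (h : ∀ p, st.head? = some p → ¬ p.2 > a.2) :
    runPops st (a :: l) = runPops (a :: st) l := by
  obtain ⟨i, c⟩ := a
  cases st with
  | nil => exact runPops_start i c l
  | cons p st' =>
    obtain ⟨j, d⟩ := p
    exact runPops_nopop j d st' i c l (h (j, d) rfl)

theorem runPops_key (a : Int × Char) (l st : List (Int × Char))
    (hst : List.IsChain (fun p q => q.2 ≤ p.2) st)
    (hc : ∀ p, st.head? = some p → p.2 ≤ a.2) :
    runPops st (a :: l) = firstPopIdx (a :: l) :: runPops st (delOnceP (a :: l)) := by
  induction l generalizing st a with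
  | nil =>
    obtain ⟨ai, ac⟩ := a
    rw [runPops_push _ _ _ (by intro q hq; exact not_lt.mpr (hc q hq))]
    simp [runPops_nil, delOnceP, firstPopIdx]
  | cons b t ih =>
    obtain ⟨ai, ac⟩ := a
    obtain ⟨bi, bc⟩ := b
    have hpush : runPops st ((ai, ac) :: (bi, bc) :: t) = runPops ((ai, ac) :: st) ((bi, bc) :: t) :=
      runPops_push _ _ _ (by intro q hq; exact not_lt.mpr (hc q hq))
    by_cases hab : ac > bc
    · rw [hpush, runPops_pop _ _ _ _ _ _ hab]
      simp [delOnceP, firstPopIdx, hab]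
    · have hle : ac ≤ bc := not_lt.mp hab
      have hst' : List.IsChain (fun p q : Int × Char => q.2 ≤ p.2) ((ai, ac) :: st) := by
        cases st with
        | nil => simp
        | cons p st' => exact List.isChain_cons_cons.mpr ⟨hc p rfl, hst⟩
      have ih1 := ih (bi, bc) ((ai, ac) :: st) hst' (by intro q hq; cases hq; exact hle)
      rw [hpush, ih1]
      have h1 : delOnceP ((ai, ac) :: (bi, bc) :: t) = (ai, ac) :: delOnceP ((bi, bc) :: t) := by
        simp [delOnceP, hab]
      have h2 : firstPopIdx ((ai, ac) :: (bi, bc) :: t) = firstPopIdx ((bi, bc) :: t) := by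
        simp [firstPopIdx, hab]
      rw [h1, h2, runPops_push _ _ _ (by intro q hq; exact not_lt.mpr (hc q hq))]

theorem runPops_perm (st l : List (Int × Char)) :
    (runPops st l).Perm (st.map Prod.fst ++ l.map Prod.fst) := by
  fun_induction runPops st l with
  | case1 st => simp
  | case2 i c rest ih => simpa using ih
  | case3 j d st i c rest h ih => simpa using ih.cons j
  | case4 j d st i c rest h ih =>
    refine ih.trans ?_
    simp only [List.map_cons, List.cons_append]
    exact (List.perm_middle (a := i) (l₁ := j :: List.map Prod.fst st)
      (l₂ := List.map Prod.fst rest)).symm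

theorem firstPopIdx_mem : ∀ l : List (Int × Char), l ≠ [] → firstPopIdx l ∈ l.map Prod.fst
  | [p], _ => by simp [firstPopIdx]
  | a :: b :: t, _ => by
    by_cases hab : a.2 > b.2
    · simp [firstPopIdx, hab]
    · have hrec := firstPopIdx_mem (b :: t) (by simp)
      have : firstPopIdx (a :: b :: t) = firstPopIdx (b :: t) := by
        simp [firstPopIdx, hab]
      rw [this, List.map_cons]
      exact List.mem_cons_of_mem _ hrec

theorem delOnceP_eq_filter : ∀ l : List (Int × Char), (l.map Prod.fst).Nodup →
    delOnceP l = l.filter (fun p => p.1 != firstPopIdx l)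
  | [], _ => by simp [delOnceP]
  | [p], _ => by simp [delOnceP, firstPopIdx]
  | a :: b :: t, hnd => by
    have hnd' : (a.1 :: (b :: t).map Prod.fst).Nodup := by simpa using hnd
    have hmem1 : a.1 ∉ (b :: t).map Prod.fst := (List.nodup_cons.mp hnd').1
    have hnd2 : ((b :: t).map Prod.fst).Nodup := (List.nodup_cons.mp hnd').2
    by_cases hab : a.2 > b.2
    · have h1 : delOnceP (a :: b :: t) = b :: t := by simp [delOnceP, hab]
      have h2 : firstPopIdx (a :: b :: t) = a.1 := by simp [firstPopIdx, hab]
      rw [h1, h2, List.filter_cons_of_neg (by simp)]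
      refine (List.filter_eq_self.mpr ?_).symm
      intro p hp
      simp only [bne_iff_ne, ne_eq]
      intro hEq
      exact hmem1 (hEq ▸ List.mem_map_of_mem hp)
    · have h1 : delOnceP (a :: b :: t) = a :: delOnceP (b :: t) := by simp [delOnceP, hab]
      have h2 : firstPopIdx (a :: b :: t) = firstPopIdx (b :: t) := by simp [firstPopIdx, hab]
      have hane : a.1 ≠ firstPopIdx (b :: t) := by
        intro hEq
        exact hmem1 (hEq ▸ firstPopIdx_mem (b :: t) (by simp))
      rw [h1, h2, List.filter_cons_of_pos (by simpa using hane),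
          delOnceP_eq_filter (b :: t) hnd2]

theorem delOnceP_length : ∀ l : List (Int × Char), l ≠ [] →
    (delOnceP l).length = l.length - 1
  | [p], _ => by simp [delOnceP]
  | a :: b :: t, _ => by
    by_cases hab : a.2 > b.2
    · simp [delOnceP, hab]
    · have := delOnceP_length (b :: t) (by simp)
      simp only [delOnceP, hab, ite_false, List.length_cons, this]
      simp

theorem delIterP_eq_filter (r : Nat) (l : List (Int × Char))
    (hnd : (l.map Prod.fst).Nodup) (hr : r ≤ l.length) :
    delIterP r l = l.filter (fun p => decide (p.1 ∉ (runPops [] l).take r)) := by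
  induction r generalizing l with
  | zero => simp [delIterP]
  | succ r ih =>
    cases l with
    | nil => simp at hr
    | cons x l' =>
      obtain ⟨xi, xc⟩ := x
      have hkey := runPops_key (xi, xc) l' [] (by simp) (by simp)
      have hfilt := delOnceP_eq_filter ((xi, xc) :: l') hnd
      have hndD : ((delOnceP ((xi, xc) :: l')).map Prod.fst).Nodup := by
        rw [hfilt]
        exact hnd.sublist (List.Sublist.map Prod.fst List.filter_sublist)
      have hlenD : r ≤ (delOnceP ((xi, xc) :: l')).length := by
        rw [delOnceP_length _ (by simp)]
        simp only [List.length_cons] at hr ⊢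
        omega
      have ihD := ih (delOnceP ((xi, xc) :: l')) hndD hlenD
      have : delIterP (r + 1) ((xi, xc) :: l') = delIterP r (delOnceP ((xi, xc) :: l')) := rfl
      rw [this, ihD, hkey, List.take_succ_cons, hfilt, List.filter_filter]
      refine List.filter_congr ?_
      intro p _
      simp only [List.mem_cons, not_or, Bool.decide_and, Bool.and_comm, decide_not,
        bne, Bool.beq_eq_decide_eq]

theorem map_snd_delOnceP (l : List (Int × Char)) :
    (delOnceP l).map Prod.snd = delOnceB (l.map Prod.snd) := by
  match l with
  | [] => simp [delOnceP, delOnceB]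
  | [p] => simp [delOnceP, delOnceB]
  | a :: b :: t =>
    by_cases hab : a.2 > b.2
    · simp [delOnceP, delOnceB, hab]
    · simp only [delOnceP, delOnceB, hab, ite_false, List.map_cons]
      rw [show b.2 :: List.map Prod.snd t = (b :: t).map Prod.snd from rfl,
          ← map_snd_delOnceP (b :: t)]

theorem map_snd_delIterP (r : Nat) (l : List (Int × Char)) :
    (delIterP r l).map Prod.snd = delIterB r (l.map Prod.snd) := by
  induction r generalizing l with
  | zero => rfl
  | succ r ih => simp [delIterP, delIterB, ih, map_snd_delOnceP]

theorem drainLoopA_eq (st : List Int) (removal : List Int) (cnt : Int) :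
    drainLoopA st removal cnt = applyPops removal cnt st := by
  induction st generalizing removal cnt with
  | nil => rfl
  | cons j st' ih => simp [drainLoopA, applyPops, ih]

-- the A port's stack phase computes applyPops over the abstract pop order
theorem buildLoopA_spec (s : List Char) :
    ∀ (ltail stA : List (Int × Char)) (removal : List Int) (cnt : Int),
    (∀ p ∈ stA, PySem.List.pyGetD s p.1 ' ' = p.2) →
    (∀ p ∈ ltail, PySem.List.pyGetD s p.1 ' ' = p.2) →
    (fun b => drainLoopA b.1 b.2.1 b.2.2)
        (buildLoopA s ltail (stA.map Prod.fst) removal cnt)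
      = applyPops removal cnt (runPops stA ltail)
  | [], stA, removal, cnt, hst, hl => by
    simp only [buildLoopA, runPops_nil]
    exact drainLoopA_eq _ _ _
  | (i, c) :: rest, [], removal, cnt, hst, hl => by
    have hstep : buildLoopA s ((i, c) :: rest) [] removal cnt
        = buildLoopA s rest [i] removal cnt := by
      simp [buildLoopA, popWhileA]
    simp only [List.map_nil]
    rw [hstep, runPops_start]
    have := buildLoopA_spec s rest [(i, c)] removal cnt
      (by intro p hp; rcases List.mem_cons.mp hp with h | h
          · subst h; exact hl (i, c) (by simp)
          · simp at h)
      (fun p hp => hl p (List.mem_cons_of_mem _ hp))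
    simpa using this
  | (i, c) :: rest, (j, d) :: stA', removal, cnt, hst, hl => by
    have hsj : PySem.List.pyGetD s j ' ' = d := hst (j, d) (by simp)
    by_cases hjd : d > c
    · have hpop : popWhileA s c (j :: stA'.map Prod.fst) removal cnt
          = popWhileA s c (stA'.map Prod.fst) (PySem.List.pySetD removal j (cnt + 1)) (cnt + 1) := by
        simp [popWhileA, hsj, hjd]
      have hstep : buildLoopA s ((i, c) :: rest) (j :: stA'.map Prod.fst) removal cnt
          = buildLoopA s ((i, c) :: rest) (stA'.map Prod.fst)
              (PySem.List.pySetD removal j (cnt + 1)) (cnt + 1) := by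
        conv_lhs => rw [buildLoopA]
        conv_rhs => rw [buildLoopA]
        rw [hpop]
      simp only [List.map_cons]
      rw [hstep, runPops_pop _ _ _ _ _ _ hjd]
      have := buildLoopA_spec s ((i, c) :: rest) stA'
        (PySem.List.pySetD removal j (cnt + 1)) (cnt + 1)
        (fun p hp => hst p (List.mem_cons_of_mem _ hp)) hl
      exact this
    · have hpop : popWhileA s c (j :: stA'.map Prod.fst) removal cnt
          = (j :: stA'.map Prod.fst, removal, cnt) := by
        simp [popWhileA, hsj, hjd]
      have hstep : buildLoopA s ((i, c) :: rest) (j :: stA'.map Prod.fst) removal cnt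
          = buildLoopA s rest (i :: j :: stA'.map Prod.fst) removal cnt := by
        conv_lhs => rw [buildLoopA]
        rw [hpop]
      simp only [List.map_cons]
      rw [hstep, runPops_nopop _ _ _ _ _ _ hjd]
      exact buildLoopA_spec s rest ((i, c) :: (j, d) :: stA') removal cnt
        (by intro p hp; rcases List.mem_cons.mp hp with h | hp
            · subst h; exact hl (i, c) (by simp)
            · exact hst p hp)
        (fun p hp => hl p (List.mem_cons_of_mem _ hp))
termination_by ltail stA _ _ => (ltail.length, stA.length)


theorem applyPops_getElem? (P : List Int) (removal : List Int) (cnt : Int) (k : Nat)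
    (hnd : P.Nodup) (hP : ∀ j ∈ P, 0 ≤ j ∧ j.toNat < removal.length) :
    (applyPops removal cnt P)[k]? =
      if (k : Int) ∈ P then some (cnt + 1 + (P.idxOf (k : Int) : Int)) else removal[k]? := by
  induction P generalizing removal cnt with
  | nil => simp [applyPops]
  | cons j P' ih =>
    have hj := hP j (by simp)
    have hstep : applyPops removal cnt (j :: P')
        = applyPops (removal.set j.toNat (cnt + 1)) (cnt + 1) P' := by
      simp [applyPops, PySem.List.pySetD_of_nonneg removal (cnt + 1) hj.1]
    have hP' : ∀ i ∈ P', 0 ≤ i ∧ i.toNat < (removal.set j.toNat (cnt + 1)).length := by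
      intro i hi
      have := hP i (List.mem_cons_of_mem _ hi)
      simpa using this
    rw [hstep, ih _ _ (List.Nodup.of_cons hnd) hP']
    by_cases hk1 : (k : Int) ∈ P'
    · have hkj : (k : Int) ≠ j := by
        intro hEq
        exact (List.nodup_cons.mp hnd).1 (hEq ▸ hk1)
      rw [if_pos hk1, if_pos (List.mem_cons_of_mem _ hk1),
          List.idxOf_cons_ne _ (fun h => hkj h.symm)]
      push_cast
      ring_nf
    · by_cases hk2 : (k : Int) = j
      · have hkNat : k = j.toNat := by omega
        subst hkNat
        rw [if_neg hk1, if_pos (by simp [hk2]), hk2, List.idxOf_cons_self,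
            List.getElem?_set_self (by omega)]
        simp
      · rw [if_neg hk1, if_neg (by simp [hk1, hk2]),
            List.getElem?_set_ne (by omega)]

theorem scanLoopA_spec (s : List Char) (round : Int) :
    ∀ (rl : List (Int × Int)) (pos : Int), 1 ≤ pos →
    scanLoopA s round rl pos =
      (let surv := (rl.filter (fun p => decide (p.2 > round))).map Prod.fst
       if pos ≤ (surv.length : Int) then
         String.ofList [PySem.List.pyGetD s (PySem.List.pyGetD surv (pos - 1) 0) ' ']
       else "")
  | [], pos, hpos => by
    simp only [List.filter_nil, List.map_nil, List.length_nil]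
    rw [if_neg (by omega)]
    rfl
  | (i, t) :: rest, pos, hpos => by
    by_cases ht : t > round
    · have hf : ((i, t) :: rest).filter (fun p => decide (p.2 > round))
          = (i, t) :: rest.filter (fun p => decide (p.2 > round)) := by
        simp [ht]
      by_cases hp1 : pos = 1
      · subst hp1
        have h1 : scanLoopA s round ((i, t) :: rest) 1 = String.ofList [PySem.List.pyGetD s i ' '] := by
          simp [scanLoopA, ht]
        rw [h1]
        simp only [hf, List.map_cons, List.length_cons]
        rw [if_pos (by push_cast; omega)]
        simp [PySem.List.pyGetD_zero_cons]
      · have hpos2 : 1 ≤ pos - 1 := by omega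
        have hstep : scanLoopA s round ((i, t) :: rest) pos = scanLoopA s round rest (pos - 1) := by
          simp only [scanLoopA, ht, ite_true]
          rw [if_neg (by omega)]
        rw [hstep, scanLoopA_spec s round rest (pos - 1) hpos2]
        simp only [hf, List.map_cons, List.length_cons]
        set surv := (rest.filter (fun p => decide (p.2 > round))).map Prod.fst with hsurv
        by_cases hlen : pos - 1 ≤ (surv.length : Int)
        · rw [if_pos hlen, if_pos (by push_cast at hlen ⊢; omega)]
          have harg : PySem.List.pyGetD (i :: surv) (pos - 1) 0
              = PySem.List.pyGetD surv (pos - 1 - 1) 0 := by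
            rw [PySem.List.pyGetD_of_nonneg (i :: surv) 0 (by omega),
                PySem.List.pyGetD_of_nonneg surv 0 (by omega)]
            have hT : (pos - 1).toNat = (pos - 1 - 1).toNat + 1 := by omega
            rw [hT, List.getD_cons_succ]
          rw [harg]
        · rw [if_neg hlen, if_neg (by push_cast at hlen ⊢; omega)]
    · have hf : ((i, t) :: rest).filter (fun p => decide (p.2 > round))
          = rest.filter (fun p => decide (p.2 > round)) := by
        simp [ht]
      have hstep : scanLoopA s round ((i, t) :: rest) pos = scanLoopA s round rest pos := by
        simp only [scanLoopA, ht, ite_false]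
        rw [if_neg (by omega)]
      rw [hstep, scanLoopA_spec s round rest pos hpos]
      simp only [hf]

theorem length_applyPops (P : List Int) (removal : List Int) (cnt : Int)
    (hP : ∀ j ∈ P, 0 ≤ j) :
    (applyPops removal cnt P).length = removal.length := by
  induction P generalizing removal cnt with
  | nil => rfl
  | cons j P' ih =>
    have hj := hP j (by simp)
    rw [show applyPops removal cnt (j :: P')
          = applyPops (removal.set j.toNat (cnt + 1)) (cnt + 1) P' from by
        simp [applyPops, PySem.List.pySetD_of_nonneg removal (cnt + 1) hj],
      ih _ _ (fun j hj => hP j (List.mem_cons_of_mem _ hj))]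
    simp

theorem solve_eq_alt (S : String) (pos : Int) (hpos : 1 ≤ pos) :
    solve S pos = solve_alt S pos := by
  simp only [solve, solve_alt, solveRoundAB]
  set s := S.toList with hs
  set N : Int := PySem.List.len s with hN
  have hNlen : N = (s.length : Int) := by simp [hN, PySem.List.len_eq]
  set pr := solveRoundB (PySem.List.pyRange 0 N 1) N pos 0 with hpr
  have hrange : ∀ i ∈ PySem.List.pyRange 0 N 1, 0 ≤ i ∧ i + 1 ≤ N := by
    intro i hi
    have := (PySem.List.mem_pyRange_one).mp hi
    omega
  have hr0 := solveRoundB_round_le (PySem.List.pyRange 0 N 1) N pos 0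
    le_rfl (by omega) hrange
  have hp1 : 1 ≤ pr.1 := solveRoundB_pos_ge _ _ _ _ hpos
  set l := PySem.List.enumerate s 0 with hl
  set P := runPops [] l with hP
  have hchars : ∀ p ∈ l, PySem.List.pyGetD s p.1 ' ' = p.2 := by
    intro p hp
    rw [hl] at hp
    obtain ⟨k, hk, hpeq⟩ := (PySem.List.mem_enumerate_iff s 0 p).mp hp
    subst hpeq
    simp [List.getD_eq_getElem?_getD, List.getElem?_eq_getElem hk]
  have hPperm : P.Perm (PySem.List.pyRange 0 N 1) := by
    have := runPops_perm [] l
    simp only [List.map_nil, List.nil_append] at this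
    rw [hP, hl]
    refine this.trans ?_
    rw [PySem.List.map_fst_enumerate]
    simp [hNlen]
  have hPnd : P.Nodup := hPperm.nodup_iff.mpr (PySem.List.nodup_pyRange_one 0 N)
  have hPmem : ∀ j : Int, j ∈ P ↔ 0 ≤ j ∧ j < N := by
    intro j
    rw [hPperm.mem_iff, PySem.List.mem_pyRange_one]
  -- the removal array
  have hbuild := buildLoopA_spec s l [] (List.replicate s.length (-1 : Int)) 0
    (by intro p hp; simp at hp) hchars
  simp only [List.map_nil] at hbuild
  set removal := drainLoopA (buildLoopA s l [] (List.replicate s.length (-1 : Int)) 0).1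
      (buildLoopA s l [] (List.replicate s.length (-1 : Int)) 0).2.1
      (buildLoopA s l [] (List.replicate s.length (-1 : Int)) 0).2.2 with hremdef
  have hremAP : removal = applyPops (List.replicate s.length (-1 : Int)) 0 P := hbuild
  have hremlen : removal.length = s.length := by
    rw [hremAP, length_applyPops _ _ _ (fun j hj => ((hPmem j).mp hj).1)]
    simp
  have hrem : ∀ k : Nat, k < s.length → removal[k]? = some (1 + (P.idxOf (k : Int) : Int)) := by
    intro k hk
    rw [hremAP, applyPops_getElem? P _ 0 k hPnd
      (by intro j hj
          have := (hPmem j).mp hj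
          constructor
          · exact this.1
          · simp only [List.length_replicate]
            omega)]
    rw [if_pos ((hPmem (k : Int)).mpr (by constructor <;> omega))]
    ring_nf
  -- A side: rewrite the scan into a filtered index list
  have hr0' : 0 ≤ pr.2 ∧ pr.2 ≤ N := by rw [hpr]; exact hr0
  rw [scanLoopA_spec s pr.2 (PySem.List.enumerate removal) pr.1 hp1]
  set R := PySem.List.pyRange 0 N 1 with hR
  set q : Int → Bool := fun j => decide (j ∉ P.take pr.2.toNat) with hq
  have hNrem : PySem.List.len removal = N := by
    simp [PySem.List.len_eq, hremlen, hNlen]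
  have hsurvA : ((PySem.List.enumerate removal).filter (fun p => decide (p.2 > pr.2))).map Prod.fst
      = R.filter q := by
    rw [PySem.List.enumerate_eq_map_pyRange removal 0, hNrem, List.filter_map, List.map_map]
    have hid : (Prod.fst ∘ fun j : Int => (j, PySem.List.pyGetD removal j 0)) = id := by
      funext j; rfl
    rw [hid, List.map_id]
    refine List.filter_congr ?_
    intro j hj
    have hjb := (PySem.List.mem_pyRange_one).mp hj
    have hjP : j ∈ P := (hPmem j).mpr hjb
    have hval : PySem.List.pyGetD removal j 0 = 1 + (P.idxOf j : Int) := by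
      rw [PySem.List.pyGetD_of_nonneg removal 0 hjb.1, List.getD_eq_getElem?_getD]
      have hlt : j.toNat < s.length := by omega
      have := hrem j.toNat hlt
      rw [show ((j.toNat : Int)) = j from by omega] at this
      rw [this]
      rfl
    have hiff : (1 + (P.idxOf j : Int) > pr.2) ↔ j ∉ P.take pr.2.toNat := by
      rw [List.mem_take_iff_idxOf_lt hjP]
      omega
    show decide (PySem.List.pyGetD removal j 0 > pr.2) = q j
    have hqj : q j = decide (j ∉ P.take pr.2.toNat) := rfl
    rw [hqj]
    simp only [hval]
    exact decide_eq_decide.mpr hiff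
  rw [hsurvA]
  -- B side: the simulated deletions are the same filter
  have hmapsnd : l.map Prod.snd = s := by
    rw [hl]
    exact PySem.List.map_snd_enumerate s 0
  have hndl : (l.map Prod.fst).Nodup := by
    rw [hl, PySem.List.map_fst_enumerate]
    exact PySem.List.nodup_pyRange_one _ _
  have hllen : l.length = s.length := by
    rw [hl]
    exact PySem.List.length_enumerate s 0
  have hrle : pr.2.toNat ≤ l.length := by
    rw [hllen]
    omega
  have hfilt := delIterP_eq_filter pr.2.toNat l hndl hrle
  rw [← hP] at hfilt
  have hlmap : l = R.map (fun j => (j, PySem.List.pyGetD s j ' ')) := by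
    rw [hl, PySem.List.enumerate_eq_map_pyRange s ' ', hR, hNlen]
    simp [PySem.List.len_eq]
  have hBlist : delIterB pr.2.toNat s
      = (R.filter q).map (fun j => PySem.List.pyGetD s j ' ') := by
    have h1 : delIterB pr.2.toNat s = (delIterP pr.2.toNat l).map Prod.snd := by
      rw [map_snd_delIterP, hmapsnd]
    rw [h1, hfilt]
    conv_lhs => rw [hlmap]
    rw [List.filter_map, List.map_map,
        show ((fun p : Int × Char => decide (p.1 ∉ P.take pr.2.toNat)) ∘
            fun j : Int => (j, PySem.List.pyGetD s j ' ')) = q from funext fun j => rfl,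
        show (Prod.snd ∘ fun j : Int => (j, PySem.List.pyGetD s j ' '))
            = (fun j : Int => PySem.List.pyGetD s j ' ') from funext fun j => rfl]
  rw [hBlist]
  -- compare the two guarded lookups
  simp only [PySem.List.len_eq, List.length_map]
  by_cases hc : pr.1 ≤ ((R.filter q).length : Int)
  · have hklt : (pr.1 - 1).toNat < (R.filter q).length := by omega
    have hklt2 : (pr.1 - 1).toNat
        < ((R.filter q).map (fun j => PySem.List.pyGetD s j ' ')).length := by
      simpa using hklt
    have e1 : PySem.List.pyGetD ((R.filter q).map (fun j => PySem.List.pyGetD s j ' '))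
          (pr.1 - 1) ' '
        = PySem.List.pyGetD s (PySem.List.pyGetD (R.filter q) (pr.1 - 1) 0) ' ' := by
      rw [PySem.List.pyGetD_of_nonneg
            ((R.filter q).map (fun j => PySem.List.pyGetD s j ' ')) ' ' (by omega),
          PySem.List.pyGetD_of_nonneg (R.filter q) (0 : Int) (by omega),
          List.getD_eq_getElem _ _ hklt2, List.getD_eq_getElem _ _ hklt, List.getElem_map]
    rw [if_pos hc, if_pos ⟨hp1, hc⟩, e1]
  · rw [if_neg hc, if_neg (fun h => hc h.2)]

-- ===== VERDICT (by name: the statement is the Claim_ definition above) =====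
theorem solve_spec : Claim_equal_solve := by
  intro S pos _ hpre
  exact solve_eq_alt S pos hpre.1
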